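-- pv_equiv track=rewrite | github.com/danielpham765/novel-tts | novel_tts/translate/captions.py | collect_subtitle_text_line_indices
-- ===== SOURCE A (Python) =====
-- def collect_subtitle_text_line_indices(lines: list[str]) -> list[int]:
--     indices: list[int] = []
--     for idx in range(len(lines) - 1):
--         is_index = lines[idx].strip().isdigit()
--         is_time = "-->" in lines[idx + 1]
--         if not is_index or not is_time:
--             continue
--         pointer = idx + 2
--         while pointer < len(lines) and lines[pointer].strip():
--             indices.append(pointer)
--             pointer += 1
--     return indices
-- ===== SOURCE B (Python) =====
-- def collect_subtitle_text_line_indices(lines: list[str]) -> list[int]: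
--     n = len(lines)
--     # next_blank[i] = smallest j >= i with lines[j].strip() falsy, or n if none
--     next_blank = [n] * (n + 1)
--     for i in range(n - 1, -1, -1):
--         next_blank[i] = i if not lines[i].strip() else next_blank[i + 1]
--     indices: list[int] = []
--     for idx in range(n - 1):
--         if lines[idx].strip().isdigit() and "-->" in lines[idx + 1]:
--             indices.extend(range(idx + 2, next_blank[idx + 2]))
--     return indices
-- ===== Notes on version B (the rewrite author's own statement) =====
-- stated objective: alternative
-- what changed: A's inner while-scan after each cue header is replaced by a single backward pass building a next-blank-line table, so each text block is emitted as one range(idx+2, next_blank[idx+2]) lookup instead of a forward scan.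
import Mathlib
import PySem

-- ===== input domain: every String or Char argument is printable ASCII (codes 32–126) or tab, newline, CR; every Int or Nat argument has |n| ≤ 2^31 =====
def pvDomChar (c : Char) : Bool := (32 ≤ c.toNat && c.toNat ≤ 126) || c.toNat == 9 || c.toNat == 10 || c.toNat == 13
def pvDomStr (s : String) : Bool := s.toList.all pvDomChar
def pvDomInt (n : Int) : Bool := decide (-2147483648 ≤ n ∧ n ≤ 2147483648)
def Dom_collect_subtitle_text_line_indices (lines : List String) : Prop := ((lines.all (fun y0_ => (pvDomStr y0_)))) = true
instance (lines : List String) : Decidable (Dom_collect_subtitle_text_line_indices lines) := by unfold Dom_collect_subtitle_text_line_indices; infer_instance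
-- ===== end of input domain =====

-- B replaces A's inner while-scan with a backward-built next-blank table and a range extend (objective: alternative decomposition).

-- ===== PORT A =====
-- the inner 'while pointer < len(lines) and lines[pointer].strip(): indices.append(pointer); pointer += 1'
def aScan (lines : List String) (pointer : Nat) (acc : List Int) : List Int :=
  if _h : pointer < lines.length ∧ PySem.Str.strip (lines.getD pointer "") ≠ "" then
    aScan lines (pointer + 1) (acc ++ [(pointer : Int)])
  else acc
termination_by lines.length - pointer
decreasing_by omega

def collect_subtitle_text_line_indices (lines : List String) : List Int :=
  (List.range (lines.length - 1)).foldl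
    (fun acc idx =>
      let is_index := PySem.Str.strIsdigit (PySem.Str.strip (lines.getD idx ""))
      let is_time := PySem.Str.isIn "-->" (lines.getD (idx + 1) "")
      if ¬ is_index ∨ ¬ is_time then acc
      else aScan lines (idx + 2) acc)
    []

-- ===== PORT B =====
-- backward pass: nbBuild lines i0 is the table next_blank[i0..i0+len], next_blank[i] = i if lines[i-i0] blank else next_blank[i+1]
def nbBuild : List String → Nat → List Int
  | [], i0 => [(i0 : Int)]
  | s :: rest, i0 =>
      let t := nbBuild rest (i0 + 1)
      (if PySem.Str.strip s = "" then (i0 : Int) else t.headD 0) :: t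

def collect_subtitle_text_line_indices_alt (lines : List String) : List Int :=
  let nb := nbBuild lines 0
  (List.range (lines.length - 1)).foldl
    (fun acc idx =>
      if PySem.Str.strIsdigit (PySem.Str.strip (lines.getD idx "")) ∧
         PySem.Str.isIn "-->" (lines.getD (idx + 1) "") then
        acc ++ PySem.List.pyRange ((idx : Int) + 2) (nb.getD (idx + 2) 0) 1
      else acc)
    []

-- ===== PRECONDITION & SPEC =====
def Spec_collect_subtitle_text_line_indices (lines : List String) (out : List Int) : Prop := out = collect_subtitle_text_line_indices_alt lines
instance (lines : List String) (out : List Int) : Decidable (Spec_collect_subtitle_text_line_indices lines out) := by unfold Spec_collect_subtitle_text_line_indices; infer_instance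

-- ===== CLAIM (what is proved, stated in full; the proofs are below) =====
def Claim_equal_collect_subtitle_text_line_indices : Prop := ∀ (lines : List String), Dom_collect_subtitle_text_line_indices lines → Spec_collect_subtitle_text_line_indices lines (collect_subtitle_text_line_indices lines)

-- ===== LEMMAS AND PROOFS =====

theorem nbBuild_ne_nil (ls : List String) (i0 : Nat) : nbBuild ls i0 ≠ [] := by
  cases ls <;> simp [nbBuild]

theorem nbBuild_getD_last (ls : List String) (i0 : Nat) :
    (nbBuild ls i0).getD ls.length 0 = ((i0 + ls.length : Nat) : Int) := by
  induction ls generalizing i0 with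
  | nil => simp [nbBuild]
  | cons s rest ih =>
      simp only [nbBuild, List.length_cons, List.getD_cons_succ]
      rw [ih (i0 + 1)]
      push_cast; ring

theorem nbBuild_getD_step (ls : List String) (i0 k : Nat) (hk : k < ls.length) :
    (nbBuild ls i0).getD k 0 =
      if PySem.Str.strip (ls.getD k "") = "" then ((i0 + k : Nat) : Int)
      else (nbBuild ls i0).getD (k + 1) 0 := by
  induction ls generalizing i0 k with
  | nil => simp at hk
  | cons s rest ih =>
      cases k with
      | zero =>
          by_cases hb : PySem.Str.strip s = ""
          · simp [nbBuild, hb]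
          · simp only [nbBuild, List.getD_cons_zero, hb, if_false, Nat.add_zero]
            cases h : nbBuild rest (i0 + 1) with
            | nil => exact absurd h (nbBuild_ne_nil rest (i0 + 1))
            | cons a t => simp
      | succ k' =>
          simp only [nbBuild, List.getD_cons_succ]
          rw [ih (i0 + 1) k' (by simpa using hk)]
          congr 2
          ring

theorem nbBuild_getD_bounds (ls : List String) (i0 k : Nat) (hk : k ≤ ls.length) :
    ((i0 + k : Nat) : Int) ≤ (nbBuild ls i0).getD k 0 ∧
      (nbBuild ls i0).getD k 0 ≤ ((i0 + ls.length : Nat) : Int) := by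
  induction hn : ls.length - k generalizing k with
  | zero =>
      have : k = ls.length := by omega
      subst this
      rw [nbBuild_getD_last]
      omega
  | succ m ih =>
      have hk' : k < ls.length := by omega
      rw [nbBuild_getD_step ls i0 k hk']
      by_cases hb : PySem.Str.strip (ls.getD k "") = ""
      · simp only [hb, if_true]; push_cast; omega
      · simp only [hb, if_false]
        have := ih (k + 1) (by omega) (by omega)
        push_cast at this ⊢; omega

-- the while-scan from p equals the range up to the next blank line
theorem aScan_eq_range (lines : List String) (p : Nat) (acc : List Int) (hp : p ≤ lines.length) :
    aScan lines p acc = acc ++ PySem.List.pyRange (p : Int) ((nbBuild lines 0).getD p 0) 1 := by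
  induction hn : lines.length - p generalizing p acc with
  | zero =>
      have hpe : p = lines.length := by omega
      rw [aScan]
      simp only [hpe, lt_irrefl, false_and, dif_neg, not_false_iff]
      rw [nbBuild_getD_last]
      rw [PySem.List.pyRange_one_eq_nil (by simp)]
      simp
  | succ m ih =>
      have hlt : p < lines.length := by omega
      rw [aScan]
      by_cases hb : PySem.Str.strip (lines.getD p "") = ""
      · simp only [hlt, hb, ne_eq, not_true_eq_false, and_false,
          dif_neg, not_false_iff]
        rw [nbBuild_getD_step lines 0 p hlt]
        simp only [hb, if_true, Nat.zero_add]
        rw [PySem.List.pyRange_one_eq_nil (le_refl _)]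
        simp
      · simp only [hlt, hb, ne_eq, not_false_eq_true, and_true, dif_pos]
        rw [ih (p + 1) (acc ++ [(p : Int)]) (by omega) (by omega)]
        rw [nbBuild_getD_step lines 0 p hlt]
        simp only [hb, if_false]
        have hbnd := nbBuild_getD_bounds lines 0 (p + 1) (by omega)
        rw [PySem.List.pyRange_one_cons (a := (p : Int)) (by push_cast at hbnd ⊢; omega)]
        have : ((p : Int) + 1) = ((p + 1 : Nat) : Int) := by push_cast; ring
        rw [this]
        simp

-- ===== VERDICT (by name: the statement is the Claim_ definition above) =====
theorem collect_subtitle_text_line_indices_spec : Claim_equal_collect_subtitle_text_line_indices := by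
  intro lines _
  unfold Spec_collect_subtitle_text_line_indices
  unfold collect_subtitle_text_line_indices collect_subtitle_text_line_indices_alt
  apply PySem.List.foldl_congr_mem
  intro acc idx hidx
  have hlt : idx < lines.length - 1 := List.mem_range.mp hidx
  simp only []
  by_cases hc : PySem.Str.strIsdigit (PySem.Str.strip (lines.getD idx "")) = true ∧
      PySem.Str.isIn "-->" (lines.getD (idx + 1) "") = true
  · rw [if_neg (by tauto), if_pos hc]
    rw [aScan_eq_range lines (idx + 2) acc (by omega)]
    norm_cast
  · rw [if_pos (by tauto), if_neg hc]
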